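-- pv_equiv track=rewrite | github.com/lEWFkRAD/bearden-intake | workpaper_export.py | _match_payers
-- ===== SOURCE A (Python) =====
-- def _match_payers(section, fact_lookup):
--     """Find all payer_keys that match this section's match_types.
--
--     Returns list of (doc_type, payer_key, payer_display) tuples.
--     """
--     matched = []
--     seen = set()
--     for mt in section.get("match_types", []):
--         for dt, payers in fact_lookup.items():
--             if dt == mt:
--                 for pk, fields in payers.items():
--                     key = (dt, pk)
--                     if key not in seen:
--                         seen.add(key)
--                         # Get payer_display from any fact in this group
--                         display = ""
--                         for f in fields.values():
--                             display = f.get("payer_display", "")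
--                             if display:
--                                 break
--                         matched.append((dt, pk, display))
--     return matched
-- ===== SOURCE B (Python) =====
-- def _match_payers(section, fact_lookup):
--     """Find all payer_keys that match this section's match_types.
--
--     Returns list of (doc_type, payer_key, payer_display) tuples.
--     """
--     mts = section.get("match_types", [])
--     wanted = set(mts)
--     # Stage 1: one pass over fact_lookup, indexing the output block of every wanted doc type.
--     blocks = {
--         dt: [(dt, pk, _first_display(fields)) for pk, fields in payers.items()]
--         for dt, payers in fact_lookup.items()
--         if dt in wanted
--     }
--     # Stage 2: assemble the blocks in first-occurrence order of match_types.
--     return [t for mt in dict.fromkeys(mts) for t in blocks.get(mt, ())]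
--
--
-- def _first_display(fields):
--     return next((d for f in fields.values() if (d := f.get("payer_display", ""))), "")
-- ===== Notes on version B (the rewrite author's own statement) =====
-- stated objective: alternative
-- what changed: B works in two staged passes: one pass over fact_lookup builds an index doc_type -> ready-made output block (for doc types in set(match_types)), then the blocks are concatenated in first-occurrence order of match_types; A's per-match_type scan over fact_lookup and its (dt, pk) seen-set disappear.
import Mathlib
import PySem

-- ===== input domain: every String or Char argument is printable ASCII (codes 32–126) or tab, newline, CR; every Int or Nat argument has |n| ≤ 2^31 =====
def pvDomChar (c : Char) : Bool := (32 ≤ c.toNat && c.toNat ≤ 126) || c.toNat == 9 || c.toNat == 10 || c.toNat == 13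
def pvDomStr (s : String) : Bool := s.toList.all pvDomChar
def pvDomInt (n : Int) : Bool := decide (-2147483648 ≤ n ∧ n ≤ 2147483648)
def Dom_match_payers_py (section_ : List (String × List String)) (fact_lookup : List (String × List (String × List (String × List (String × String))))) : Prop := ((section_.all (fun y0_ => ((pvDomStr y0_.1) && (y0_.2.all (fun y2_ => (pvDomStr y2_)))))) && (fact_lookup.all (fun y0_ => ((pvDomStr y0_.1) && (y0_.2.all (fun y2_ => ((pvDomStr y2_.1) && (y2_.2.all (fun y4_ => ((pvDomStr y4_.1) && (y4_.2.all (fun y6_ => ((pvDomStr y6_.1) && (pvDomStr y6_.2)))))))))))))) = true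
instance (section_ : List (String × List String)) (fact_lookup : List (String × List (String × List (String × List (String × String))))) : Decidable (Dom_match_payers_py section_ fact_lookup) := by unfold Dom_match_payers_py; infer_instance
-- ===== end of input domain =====

-- B replaces A's per-match_type scan + (dt, pk) seen-set by two staged passes: one pass over
-- fact_lookup indexing ready-made output blocks, then concatenation in match_types order (objective: alternative).

-- ===== PORT A =====
-- the inner 'for f in fields.values(): display = f.get(...); if display: break' loop, carrying the current display
def pvADisplay : List (String × List (String × String)) → String → String
  | [], display => display
  | f :: rest, _ =>
    let display := PySem.Dict.getD (PySem.Dict.mk f.2) "payer_display" ""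
    if display ≠ "" then display else pvADisplay rest display

-- the innermost 'for pk, fields in payers.items()' loop of A, over state (matched, seen)
def pvAStep (dt : String)
    (st : List (String × String × String) × PySem.Set (String × String))
    (payers : List (String × List (String × List (String × String)))) :
    List (String × String × String) × PySem.Set (String × String) :=
  payers.foldl (fun st pkFields =>
    let key := (dt, pkFields.1)
    if PySem.Set.contains st.2 key then st
    else
      let seen := PySem.Set.add st.2 key
      let display := pvADisplay pkFields.2 ""
      (st.1 ++ [(dt, pkFields.1, display)], seen)) st

def match_payers_py (section_ : List (String × List String)) (fact_lookup : List (String × List (String × List (String × List (String × String))))) : List (String × String × String) :=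
  ((PySem.Dict.getD (PySem.Dict.mk section_) "match_types" []).foldl
    (fun st mt =>
      fact_lookup.foldl (fun st dtPayers =>
        if dtPayers.1 == mt then pvAStep dtPayers.1 st dtPayers.2 else st) st)
    ([], PySem.Set.empty)).1

-- ===== PORT B =====
-- B's _first_display: first truthy f.get("payer_display", "") over fields.values(), default ""
def pvBDisplay (fields : List (String × List (String × String))) : String :=
  (fields.findSome? (fun f =>
    let d := PySem.Dict.getD (PySem.Dict.mk f.2) "payer_display" ""
    if d ≠ "" then some d else none)).getD ""

-- B's stage-1 dict comprehension: index doc_type -> output block, one pass over fact_lookup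
def pvBBlocks (wanted : PySem.Set String)
    (fact_lookup : List (String × List (String × List (String × List (String × String))))) :
    PySem.Dict String (List (String × String × String)) :=
  fact_lookup.foldl (fun d p =>
    if PySem.Set.contains wanted p.1
    then PySem.Dict.insert d p.1 (p.2.map (fun q => (p.1, q.1, pvBDisplay q.2)))
    else d) PySem.Dict.empty

def match_payers_py_alt (section_ : List (String × List String)) (fact_lookup : List (String × List (String × List (String × List (String × String))))) : List (String × String × String) :=
  let mts := PySem.Dict.getD (PySem.Dict.mk section_) "match_types" []
  let blocks := pvBBlocks (PySem.Set.ofList mts) fact_lookup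
  (PySem.List.dedup mts).flatMap (fun mt => PySem.Dict.getD blocks mt [])

-- ===== PRECONDITION & SPEC =====
-- Pre_ excludes association lists with duplicate keys at any dict level: they represent no Python dict
-- (dict construction collapses duplicates), so A's behaviour there is not defined by the source.
def Pre_match_payers_py (section_ : List (String × List String)) (fact_lookup : List (String × List (String × List (String × List (String × String))))) : Prop :=
  (section_.map Prod.fst).Nodup ∧ (fact_lookup.map Prod.fst).Nodup ∧
  ∀ p ∈ fact_lookup, (p.2.map Prod.fst).Nodup ∧
    ∀ q ∈ p.2, (q.2.map Prod.fst).Nodup ∧ ∀ r ∈ q.2, (r.2.map Prod.fst).Nodup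
instance (section_ : List (String × List String)) (fact_lookup : List (String × List (String × List (String × List (String × String))))) : Decidable (Pre_match_payers_py section_ fact_lookup) := by unfold Pre_match_payers_py; infer_instance

def pvWitness_match_payers_py : (List (String × List String)) × (List (String × List (String × List (String × List (String × String))))) :=
  ([("match_types", ["w9", "1099"])],
   [("w9", [("p1", [("f1", [("payer_display", "Acme")])])])])

def Spec_match_payers_py (section_ : List (String × List String)) (fact_lookup : List (String × List (String × List (String × List (String × String))))) (out : List (String × String × String)) : Prop := out = match_payers_py_alt section_ fact_lookup
instance (section_ : List (String × List String)) (fact_lookup : List (String × List (String × List (String × List (String × String))))) (out : List (String × String × String)) : Decidable (Spec_match_payers_py section_ fact_lookup out) := by unfold Spec_match_payers_py; infer_instance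

-- ===== CLAIM (what is proved, stated in full; the proofs are below) =====
def Claim_equal_match_payers_py : Prop := ∀ (section_ : List (String × List String)) (fact_lookup : List (String × List (String × List (String × List (String × String))))), Dom_match_payers_py section_ fact_lookup → Pre_match_payers_py section_ fact_lookup → Spec_match_payers_py section_ fact_lookup (match_payers_py section_ fact_lookup)

-- ===== LEMMAS AND PROOFS =====

-- the output block of one doc type, phrased through the first-match lookup (proof device)
def pvBBlock (fact_lookup : List (String × List (String × List (String × List (String × String))))) (mt : String) : List (String × String × String) :=
  match PySem.Dict.get? (PySem.Dict.mk fact_lookup) mt with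
  | none => []
  | some payers => payers.map (fun q => (mt, q.1, pvBDisplay q.2))

-- B's flatMap restated as a first-occurrence run with an explicit 'done' set (proof device only)
def pvRun (fact_lookup : List (String × List (String × List (String × List (String × String))))) :
    List String → PySem.Set String → List (String × String × String)
  | [], _ => []
  | mt :: mts, done =>
    if PySem.Set.contains done mt then pvRun fact_lookup mts done
    else pvBBlock fact_lookup mt ++ pvRun fact_lookup mts (PySem.Set.add done mt)

-- (x, y) is a key A's seen-set can ever hold for doc type x
def pvKeyIn (fact_lookup : List (String × List (String × List (String × List (String × String))))) (x y : String) : Prop :=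
  ∃ payers, PySem.Dict.get? (PySem.Dict.mk fact_lookup) x = some payers ∧ y ∈ payers.map Prod.fst

lemma pvDisplay_eq (fields : List (String × List (String × String))) :
    pvADisplay fields "" = pvBDisplay fields := by
  induction fields with
  | nil => rfl
  | cons f rest ih =>
    simp only [pvADisplay, pvBDisplay, List.findSome?]
    by_cases h : PySem.Dict.getD (PySem.Dict.mk f.2) "payer_display" "" ≠ ""
    · simp [h]
    · simp only [ne_eq, not_not] at h
      simp [h, ih, pvBDisplay]

-- payers fold when every key is fresh
lemma pvAStep_fresh (mt : String) (payers : List (String × List (String × List (String × String)))) :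
    ∀ (acc : List (String × String × String)) (s : PySem.Set (String × String)),
    (payers.map Prod.fst).Nodup →
    (∀ pk ∈ payers.map Prod.fst, PySem.Set.contains s (mt, pk) = false) →
    pvAStep mt (acc, s) payers =
      (acc ++ payers.map (fun p => (mt, p.1, pvADisplay p.2 "")),
       s ++ payers.map (fun p => (mt, p.1))) := by
  induction payers with
  | nil => simp [pvAStep]
  | cons p rest ih =>
    intro acc s hnd hfresh
    have hc : PySem.Set.contains s (mt, p.1) = false := hfresh p.1 (by simp)
    simp only [pvAStep, List.foldl_cons, hc, Bool.false_eq_true, if_false]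
    have hmem : (mt, p.1) ∉ s := by simpa [PySem.Set.contains] using hc
    have hadd : PySem.Set.add s (mt, p.1) = s ++ [(mt, p.1)] := by
      simp [PySem.Set.add, PySem.Set.contains, hmem]
    rw [hadd]
    have := ih (acc ++ [(mt, p.1, pvADisplay p.2 "")]) (s ++ [(mt, p.1)])
      (by simpa using hnd.of_cons)
      (by
        intro pk hpk
        simp only [PySem.Set.contains, List.contains_append] at *
        have h1 := hfresh pk (by simp [hpk])
        have hne : pk ≠ p.1 := by
          rcases List.mem_map.mp hpk with ⟨q, hq, rfl⟩
          intro h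
          exact (List.nodup_cons.mp hnd).1 (h ▸ List.mem_map_of_mem hq)
        simp_all)
    simpa [pvAStep] using this

-- payers fold when every key is already seen
lemma pvAStep_stale (mt : String) (payers : List (String × List (String × List (String × String)))) :
    ∀ (acc : List (String × String × String)) (s : PySem.Set (String × String)),
    (∀ pk ∈ payers.map Prod.fst, PySem.Set.contains s (mt, pk) = true) →
    pvAStep mt (acc, s) payers = (acc, s) := by
  induction payers with
  | nil => simp [pvAStep]
  | cons p rest ih =>
    intro acc s hst
    have hc : PySem.Set.contains s (mt, p.1) = true := hst p.1 (by simp)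
    simp only [pvAStep, List.foldl_cons, hc, if_true]
    exact ih acc s (fun pk hpk => hst pk (by simp [hpk]))

-- identity scan: no entry of l matches mt
lemma pvScan_id (mt : String) (l : List (String × List (String × List (String × List (String × String)))))
    (h : ∀ p ∈ l, (p.1 == mt) = false) :
    ∀ st, l.foldl (fun st dtPayers =>
        if dtPayers.1 == mt then pvAStep dtPayers.1 st dtPayers.2 else st) st = st := by
  induction l with
  | nil => intro st; rfl
  | cons p rest ih =>
    intro st
    have hp : (p.1 == mt) = false := h p (by simp)
    simp only [List.foldl_cons, hp, Bool.false_eq_true, if_false]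
    exact ih (fun q hq => h q (by simp [hq])) st

-- a successful first-match lookup names an entry of the list
lemma pvGet_mem {v : List (String × List (String × List (String × String)))}
    (l : List (String × List (String × List (String × List (String × String))))) (k : String)
    (h : PySem.Dict.get? (PySem.Dict.mk l) k = some v) : (k, v) ∈ l := by
  induction l with
  | nil => simp [PySem.Dict.get?] at h
  | cons p rest ih =>
    rw [PySem.Dict.get?_mk_cons] at h
    by_cases hk : (p.1 == k) = true
    · simp only [hk, if_true, Option.some.injEq] at h
      have : p.1 = k := by simpa using hk
      rw [← this, ← h]
      exact List.mem_cons_self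
    · simp only [hk] at h
      exact List.mem_cons_of_mem _ (ih h)

-- scanning fact_lookup for dt == mt is the first-match lookup (keys are nodup)
lemma pvScan_eq (fact_lookup : List (String × List (String × List (String × List (String × String)))))
    (hf : (fact_lookup.map Prod.fst).Nodup) (mt : String)
    (st : List (String × String × String) × PySem.Set (String × String)) :
    fact_lookup.foldl (fun st dtPayers =>
        if dtPayers.1 == mt then pvAStep dtPayers.1 st dtPayers.2 else st) st =
      match PySem.Dict.get? (PySem.Dict.mk fact_lookup) mt with
      | none => st
      | some payers => pvAStep mt st payers := by
  induction fact_lookup generalizing st with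
  | nil => simp [PySem.Dict.get?]
  | cons p rest ih =>
    rw [PySem.Dict.get?_mk_cons]
    by_cases h : (p.1 == mt) = true
    · have heq : p.1 = mt := by simpa using h
      have hrest : ∀ q ∈ rest, (q.1 == mt) = false := by
        intro q hq
        have := (List.nodup_cons.mp hf).1
        simp only [beq_eq_false_iff_ne, ne_eq]
        intro hqe
        exact this (by rw [heq, ← hqe]; exact List.mem_map_of_mem hq)
      simp only [List.foldl_cons, h, if_true]
      rw [pvScan_id mt rest hrest (pvAStep p.1 st p.2)]
      simp [heq]
    · have hf' : (p.1 == mt) = false := by simpa using h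
      simp only [List.foldl_cons, hf', Bool.false_eq_true, if_false, ih hf.of_cons st]

-- Set.contains in membership form
lemma pvContains_iff {A : Type} [BEq A] [LawfulBEq A] (s : PySem.Set A) (x : A) :
    PySem.Set.contains s x = true ↔ x ∈ s := by
  simp [PySem.Set.contains]

-- the two cases of pvScan_eq as rewrite rules
lemma pvScan_none (fact_lookup : List (String × List (String × List (String × List (String × String)))))
    (hf : (fact_lookup.map Prod.fst).Nodup) (mt : String)
    (st : List (String × String × String) × PySem.Set (String × String))
    (hget : PySem.Dict.get? (PySem.Dict.mk fact_lookup) mt = none) :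
    fact_lookup.foldl (fun st dtPayers =>
        if dtPayers.1 == mt then pvAStep dtPayers.1 st dtPayers.2 else st) st = st := by
  rw [pvScan_eq fact_lookup hf mt st, hget]

lemma pvScan_some (fact_lookup : List (String × List (String × List (String × List (String × String)))))
    (hf : (fact_lookup.map Prod.fst).Nodup) (mt : String)
    (st : List (String × String × String) × PySem.Set (String × String))
    (payers : List (String × List (String × List (String × String))))
    (hget : PySem.Dict.get? (PySem.Dict.mk fact_lookup) mt = some payers) :
    fact_lookup.foldl (fun st dtPayers =>
        if dtPayers.1 == mt then pvAStep dtPayers.1 st dtPayers.2 else st) st =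
      pvAStep mt st payers := by
  rw [pvScan_eq fact_lookup hf mt st, hget]

-- main invariant: A's fold over match_types equals acc ++ the first-occurrence run
lemma pvA_main (fact_lookup : List (String × List (String × List (String × List (String × String)))))
    (hf : (fact_lookup.map Prod.fst).Nodup)
    (hp : ∀ p ∈ fact_lookup, (p.2.map Prod.fst).Nodup) :
    ∀ (mts : List String) (acc : List (String × String × String))
      (s : PySem.Set (String × String)) (done : PySem.Set String),
      (∀ x y, PySem.Set.contains s (x, y) = true ↔
        (PySem.Set.contains done x = true ∧ pvKeyIn fact_lookup x y)) →
      (mts.foldl (fun st mt =>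
          fact_lookup.foldl (fun st dtPayers =>
            if dtPayers.1 == mt then pvAStep dtPayers.1 st dtPayers.2 else st) st) (acc, s)).1 =
        acc ++ pvRun fact_lookup mts done := by
  intro mts
  induction mts with
  | nil => intro acc s done _; simp [pvRun]
  | cons mt mts ih =>
    intro acc s done hinv
    simp only [List.foldl_cons]
    by_cases hd : PySem.Set.contains done mt = true
    · -- mt already processed: nothing is appended
      have hrun : pvRun fact_lookup (mt :: mts) done = pvRun fact_lookup mts done := by
        show (if PySem.Set.contains done mt then pvRun fact_lookup mts done
          else pvBBlock fact_lookup mt ++ pvRun fact_lookup mts (PySem.Set.add done mt)) = _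
        rw [if_pos hd]
      rw [hrun]
      cases hget : PySem.Dict.get? (PySem.Dict.mk fact_lookup) mt with
      | none =>
        rw [pvScan_none fact_lookup hf mt (acc, s) hget]
        exact ih acc s done hinv
      | some payers =>
        rw [pvScan_some fact_lookup hf mt (acc, s) payers hget]
        rw [pvAStep_stale mt payers acc s (by
          intro pk hpk
          exact (hinv mt pk).mpr ⟨hd, payers, hget, hpk⟩)]
        exact ih acc s done hinv
    · -- mt fresh
      have hd' : PySem.Set.contains done mt = false := by simpa using hd
      have hdm : mt ∉ done := by simpa [PySem.Set.contains] using hd'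
      have hadd : PySem.Set.add done mt = done ++ [mt] := by
        simp [PySem.Set.add, PySem.Set.contains, hdm]
      have hrun : pvRun fact_lookup (mt :: mts) done =
          pvBBlock fact_lookup mt ++ pvRun fact_lookup mts (done ++ [mt]) := by
        show (if PySem.Set.contains done mt then pvRun fact_lookup mts done
          else pvBBlock fact_lookup mt ++ pvRun fact_lookup mts (PySem.Set.add done mt)) = _
        rw [if_neg hd, hadd]
      rw [hrun]
      cases hget : PySem.Dict.get? (PySem.Dict.mk fact_lookup) mt with
      | none =>
        rw [pvScan_none fact_lookup hf mt (acc, s) hget]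
        have hinv' : ∀ x y, PySem.Set.contains s (x, y) = true ↔
            (PySem.Set.contains (done ++ [mt]) x = true ∧ pvKeyIn fact_lookup x y) := by
          intro x y
          rw [hinv x y, pvContains_iff, pvContains_iff, List.mem_append, List.mem_singleton]
          constructor
          · rintro ⟨h1, h2⟩
            exact ⟨Or.inl h1, h2⟩
          · rintro ⟨h1, h2⟩
            refine ⟨?_, h2⟩
            rcases h1 with h | h
            · exact h
            · exfalso
              obtain ⟨payersx, hpp, _⟩ := h2
              rw [h, hget] at hpp
              simp at hpp
        have hblk : pvBBlock fact_lookup mt = [] := by simp [pvBBlock, hget]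
        rw [hblk, List.nil_append]
        exact ih acc s (done ++ [mt]) hinv'
      | some payers =>
        rw [pvScan_some fact_lookup hf mt (acc, s) payers hget]
        have hmem : (mt, payers) ∈ fact_lookup := pvGet_mem fact_lookup mt hget
        have hpnd : (payers.map Prod.fst).Nodup := hp (mt, payers) hmem
        rw [pvAStep_fresh mt payers acc s hpnd (by
          intro pk hpk
          by_contra hcon
          have : PySem.Set.contains s (mt, pk) = true := by
            cases hval : PySem.Set.contains s (mt, pk)
            · exact absurd hval hcon
            · rfl
          exact hd ((hinv mt pk).mp this).1)]
        have hblk : pvBBlock fact_lookup mt =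
            payers.map (fun p => (mt, p.1, pvADisplay p.2 "")) := by
          simp [pvBBlock, hget, pvDisplay_eq]
        have hinv' : ∀ x y,
            PySem.Set.contains (s ++ payers.map (fun p => (mt, p.1))) (x, y) = true ↔
            (PySem.Set.contains (done ++ [mt]) x = true ∧ pvKeyIn fact_lookup x y) := by
          intro x y
          rw [pvContains_iff, pvContains_iff, List.mem_append, List.mem_append,
            List.mem_singleton]
          constructor
          · rintro (h | h)
            · have h0 := (hinv x y).mp ((pvContains_iff s (x, y)).mpr h)
              exact ⟨Or.inl ((pvContains_iff done x).mp h0.1), h0.2⟩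
            · rcases List.mem_map.mp h with ⟨q, hq, hqe⟩
              injection hqe with hx1 hy1
              subst hx1; subst hy1
              exact ⟨Or.inr rfl, payers, hget, List.mem_map_of_mem hq⟩
          · rintro ⟨h1, h2⟩
            by_cases hx : x = mt
            · subst hx
              obtain ⟨payers', hpp, hy'⟩ := h2
              rw [hget] at hpp
              cases Option.some.inj hpp
              right
              rcases List.mem_map.mp hy' with ⟨q, hq, rfl⟩
              exact List.mem_map_of_mem hq
            · rcases h1 with h | h
              · exact Or.inl ((pvContains_iff s (x, y)).mp
                  ((hinv x y).mpr ⟨(pvContains_iff done x).mpr h, h2⟩))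
              · exact absurd h hx
        rw [ih (acc ++ payers.map fun p => (mt, p.1, pvADisplay p.2 ""))
          (s ++ payers.map fun p => (mt, p.1)) (done ++ [mt]) hinv', hblk]
        simp

lemma pvRun_cons (fact_lookup : List (String × List (String × List (String × List (String × String)))))
    (mt : String) (mts : List String) (done : PySem.Set String) :
    pvRun fact_lookup (mt :: mts) done =
      if PySem.Set.contains done mt then pvRun fact_lookup mts done
      else pvBBlock fact_lookup mt ++ pvRun fact_lookup mts (PySem.Set.add done mt) := rfl

-- the flatMap of pvBBlock over the deduped list is the run (on proof side)
lemma pvB_run (fact_lookup : List (String × List (String × List (String × List (String × String))))) :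
    ∀ (mts : List String) (done : PySem.Set String),
      (PySem.Set.update done mts).flatMap (pvBBlock fact_lookup) =
        done.flatMap (pvBBlock fact_lookup) ++ pvRun fact_lookup mts done := by
  intro mts
  induction mts with
  | nil => intro done; simp [pvRun, PySem.Set.update]
  | cons mt mts ih =>
    intro done
    have hstep : PySem.Set.update done (mt :: mts) = PySem.Set.update (PySem.Set.add done mt) mts := by
      simp [PySem.Set.update]
    rw [hstep]
    by_cases hd : PySem.Set.contains done mt = true
    · have hadd : PySem.Set.add done mt = done := by
        simp [PySem.Set.add, (pvContains_iff done mt).mp hd]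
      rw [hadd, ih done, pvRun_cons, if_pos hd]
    · have hd' : PySem.Set.contains done mt = false := by simpa using hd
      have hdm : mt ∉ done := by simpa [PySem.Set.contains] using hd'
      have hadd : PySem.Set.add done mt = done ++ [mt] := by
        simp [PySem.Set.add, PySem.Set.contains, hdm]
      rw [hadd, ih (done ++ [mt]), pvRun_cons, if_neg hd, hadd]
      simp

-- stage-1 index lookup: for a wanted key, the block index answers through the first-match lookup
lemma pvBlocks_get (wanted : PySem.Set String)
    (fact_lookup : List (String × List (String × List (String × List (String × String)))))
    (hf : (fact_lookup.map Prod.fst).Nodup) (mt : String)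
    (hw : PySem.Set.contains wanted mt = true) :
    ∀ (d : PySem.Dict String (List (String × String × String))),
      PySem.Dict.get? (fact_lookup.foldl (fun d p =>
        if PySem.Set.contains wanted p.1
        then PySem.Dict.insert d p.1 (p.2.map (fun q => (p.1, q.1, pvBDisplay q.2)))
        else d) d) mt =
      match PySem.Dict.get? (PySem.Dict.mk fact_lookup) mt with
      | none => PySem.Dict.get? d mt
      | some payers => some (payers.map (fun q => (mt, q.1, pvBDisplay q.2))) := by
  induction fact_lookup with
  | nil => intro d; simp [PySem.Dict.get?]
  | cons p rest ih =>
    intro d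
    rw [PySem.Dict.get?_mk_cons]
    simp only [List.foldl_cons]
    by_cases hk : (p.1 == mt) = true
    · have heq : p.1 = mt := by simpa using hk
      have hrestnone : PySem.Dict.get? (PySem.Dict.mk rest) mt = none := by
        rw [PySem.Dict.get?_eq_none_iff_not_mem_keys]
        intro hm
        exact (List.nodup_cons.mp hf).1 (by rw [heq]; simpa [PySem.Dict.keys_mk] using hm)
      rw [ih hf.of_cons, hrestnone]
      subst heq
      have hmemw : p.1 ∈ wanted := (pvContains_iff wanted p.1).mp hw
      simp [hmemw, PySem.Dict.get?_insert_self]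
    · have hne : mt ≠ p.1 := fun h => hk (by simp [h])
      rw [ih hf.of_cons]
      simp only [hk]
      by_cases hwp : PySem.Set.contains wanted p.1 = true
      · simp only [hwp, if_true]
        cases PySem.Dict.get? (PySem.Dict.mk rest) mt with
        | none => simp [PySem.Dict.get?_insert_of_ne d _ hne]
        | some payers => simp
      · simp only [hwp]
        rfl

-- flatMap congruence on members
lemma pvFlatMap_congr {α β : Type} {l : List α} {f g : α → List β}
    (h : ∀ x ∈ l, f x = g x) : l.flatMap f = l.flatMap g := by
  induction l with
  | nil => rfl
  | cons x xs ih =>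
    simp only [List.flatMap_cons, h x (by simp), ih (fun y hy => h y (by simp [hy]))]

-- B's port equals the flatMap of pvBBlock over the deduped match_types
lemma pvAlt_eq (section_ : List (String × List String))
    (fact_lookup : List (String × List (String × List (String × List (String × String)))))
    (hf : (fact_lookup.map Prod.fst).Nodup) :
    match_payers_py_alt section_ fact_lookup =
      (PySem.List.dedup (PySem.Dict.getD (PySem.Dict.mk section_) "match_types" [])).flatMap
        (pvBBlock fact_lookup) := by
  simp only [match_payers_py_alt]
  apply pvFlatMap_congr
  intro mt hmt
  have hinmts : mt ∈ PySem.Dict.getD (PySem.Dict.mk section_) "match_types" [] :=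
    (PySem.List.mem_dedup _ _).mp hmt
  have hw : PySem.Set.contains
      (PySem.Set.ofList (PySem.Dict.getD (PySem.Dict.mk section_) "match_types" [])) mt = true := by
    rw [pvContains_iff]
    simpa [PySem.Set.mem_ofList] using hinmts
  rw [PySem.Dict.getD_eq_get?_getD]
  unfold pvBBlocks
  rw [pvBlocks_get _ fact_lookup hf mt hw PySem.Dict.empty]
  unfold pvBBlock
  cases PySem.Dict.get? (PySem.Dict.mk fact_lookup) mt with
  | none => simp [PySem.Dict.get?_empty]
  | some payers => simp

-- ===== VERDICT (by name: the statement is the Claim_ definition above) =====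
theorem match_payers_py_spec : Claim_equal_match_payers_py := by
  intro section_ fact_lookup _ hpre
  obtain ⟨hs, hf, hrest⟩ := hpre
  unfold Spec_match_payers_py
  rw [pvAlt_eq section_ fact_lookup hf]
  unfold match_payers_py
  rw [pvA_main fact_lookup hf (fun p hp => (hrest p hp).1) _ [] PySem.Set.empty PySem.Set.empty
    (by intro x y; simp [PySem.Set.contains, PySem.Set.empty])]
  have := pvB_run fact_lookup (PySem.Dict.getD (PySem.Dict.mk section_) "match_types" []) PySem.Set.empty
  simp [PySem.Set.empty] at this
  rw [PySem.List.dedup_eq_ofList]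
  simp [PySem.Set.ofList, PySem.Set.update] at this ⊢
  rw [this]
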